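-- pv_equiv track=rewrite | github.com/lorenzo-rovigatti/oxDNA | analysis/src/oxDNA_analysis_tools/oxDNA_PDB.py | _hy36_encode_pure
-- ===== SOURCE A (Python) =====
-- def _hy36_encode_pure(digits: str, value: int) -> str:
--     n = len(digits)
--     result = []
--     while value:
--         result.append(digits[value % n])
--         value //= n
--     result.reverse()
--     return ''.join(result) if result else digits[0]
-- ===== SOURCE B (Python) =====
-- def _hy36_encode_pure(digits: str, value: int) -> str:
--     n = len(digits)
--     if not value:
--         return digits[0]
--     p = 1
--     while p * n <= value:
--         p *= n
--     out = ""
--     while p: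
--         out += digits[value // p]
--         value %= p
--         p //= n
--     return out
-- ===== Notes on version B (the rewrite author's own statement) =====
-- stated objective: alternative
-- what changed: B first finds the highest power p = n^k <= value by repeated multiplication, then extracts digits most-significant-first by dividing by decreasing powers, instead of A's least-significant-digit accumulation into a list followed by a reverse.
import Mathlib
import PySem

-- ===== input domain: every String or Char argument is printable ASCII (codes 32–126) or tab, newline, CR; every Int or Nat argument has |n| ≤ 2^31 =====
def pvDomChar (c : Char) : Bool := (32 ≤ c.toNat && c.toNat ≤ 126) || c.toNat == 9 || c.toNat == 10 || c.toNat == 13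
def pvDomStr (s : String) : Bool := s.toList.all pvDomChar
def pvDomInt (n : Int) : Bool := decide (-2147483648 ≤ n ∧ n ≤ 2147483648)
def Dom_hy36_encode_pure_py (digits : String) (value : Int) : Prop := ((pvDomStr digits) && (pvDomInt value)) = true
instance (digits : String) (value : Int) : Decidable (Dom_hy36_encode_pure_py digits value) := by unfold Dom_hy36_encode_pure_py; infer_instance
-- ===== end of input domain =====

-- B is a different algorithm: it first finds the highest power p = n^k ≤ value, then emits
-- digits most-significant-first by dividing by decreasing powers, instead of A's
-- least-significant-digit accumulation followed by a reverse.

-- ===== PORT A =====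
-- while loop of A, transcribed with a fuel bound (value.toNat+1 steps suffice on Pre_;
-- the fuel guard only makes the recursion total). digits[value % n] -> pyGet? with a
-- getD guard (in range whenever Pre_ holds).
def pvLoopA (l : List Char) (n : Int) : Nat → Int → List Char → List Char
  | 0, _, result => result
  | fuel+1, value, result =>
    if value = 0 then result
    else pvLoopA l n fuel (PySem.Int.floordiv value n)
           (result ++ [(PySem.List.pyGet? l (PySem.Int.mod value n)).getD ' '])

def hy36_encode_pure_py (digits : String) (value : Int) : String :=
  let l := digits.toList
  let n : Int := l.length
  let result := (pvLoopA l n (value.toNat + 1) value []).reverse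
  if result ≠ [] then String.mk result else String.mk [(PySem.List.pyGet? l 0).getD ' ']

-- ===== PORT B =====
-- first while loop of Source B: grow p by factors of n while p * n <= value
-- (fuel value.toNat+1 is ample on Pre_; the guard only totalises the recursion)
def pvFindP (value n : Int) : Nat → Int → Int
  | 0, p => p
  | fuel+1, p => if p * n ≤ value then pvFindP value n fuel (p * n) else p

-- second while loop of Source B: emit digits[value // p], then value %= p; p //= n
def pvMsdLoop (l : List Char) (n : Int) : Nat → Int → Int → List Char
  | 0, _, _ => []
  | fuel+1, p, value =>
    if p = 0 then []
    else (PySem.List.pyGet? l (PySem.Int.floordiv value p)).getD ' ' ::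
         pvMsdLoop l n fuel (PySem.Int.floordiv p n) (PySem.Int.mod value p)

def hy36_encode_pure_py_alt (digits : String) (value : Int) : String :=
  let l := digits.toList
  let n : Int := l.length
  if value = 0 then String.mk [(PySem.List.pyGet? l 0).getD ' ']
  else
    let p := pvFindP value n (value.toNat + 1) 1
    String.mk (pvMsdLoop l n (p.toNat + 1) p value)

-- ===== PRECONDITION & SPEC =====
-- Pre_ excludes exactly the inputs where Python A does not return: negative value
-- (the while loop never terminates), empty digits (ZeroDivisionError/IndexError),
-- and a single-character digit set with value > 0 (value //= 1 never reaches 0).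
def Pre_hy36_encode_pure_py (digits : String) (value : Int) : Prop :=
  0 ≤ value ∧ 0 < digits.toList.length ∧ (value = 0 ∨ 1 < digits.toList.length)
instance (digits : String) (value : Int) : Decidable (Pre_hy36_encode_pure_py digits value) := by
  unfold Pre_hy36_encode_pure_py; infer_instance
def pvWitness_hy36_encode_pure_py : String × Int := ("0123456789", 42)

def Spec_hy36_encode_pure_py (digits : String) (value : Int) (out : String) : Prop := out = hy36_encode_pure_py_alt digits value
instance (digits : String) (value : Int) (out : String) : Decidable (Spec_hy36_encode_pure_py digits value out) := by unfold Spec_hy36_encode_pure_py; infer_instance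

-- ===== CLAIM (what is proved, stated in full; the proofs are below) =====
def Claim_equal_hy36_encode_pure_py : Prop := ∀ (digits : String) (value : Int), Dom_hy36_encode_pure_py digits value → Pre_hy36_encode_pure_py digits value → Spec_hy36_encode_pure_py digits value (hy36_encode_pure_py digits value)

-- ===== LEMMAS AND PROOFS =====

-- pure little-endian digit list of v in base n (proof-side abstraction of A's loop)
def pvLsd (n v : Nat) : List Nat :=
  if h : n ≤ 1 ∨ v = 0 then []
  else v % n :: pvLsd n (v / n)
decreasing_by exact Nat.div_lt_self (by omega) (by omega)

-- pure big-endian digit extraction by powers (proof-side abstraction of B's second loop)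
def pvMsdK (n : Nat) : Nat → Nat → List Nat
  | 0, v => [v]
  | k+1, v => v / n^(k+1) :: pvMsdK n k (v % n^(k+1))

-- character emitted for digit d
def pvG (l : List Char) (d : Nat) : Char := (PySem.List.pyGet? l (d : Int)).getD ' '

theorem pvLsd_closed (n : Nat) (hn : 2 ≤ n) :
    ∀ (k v : Nat), n^k ≤ v → v < n^(k+1) →
      pvLsd n v = (List.range (k+1)).map (fun i => v / n^i % n) := by
  intro k
  induction k with
  | zero =>
    intro v h1 h2
    simp only [pow_zero] at h1
    have h2' : v < n := by simpa using h2
    rw [pvLsd]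
    rw [dif_neg (by omega)]
    rw [pvLsd]
    rw [dif_pos (by right; exact Nat.div_eq_of_lt h2')]
    simp
  | succ k ih =>
    intro v h1 h2
    have hnk : 1 ≤ n^(k+1) := Nat.one_le_pow _ _ (by omega)
    have hv1 : 1 ≤ v := le_trans hnk h1
    rw [pvLsd, dif_neg (by omega)]
    have hb1 : n^k ≤ v / n := by
      rw [Nat.le_div_iff_mul_le (by omega)]
      calc n^k * n = n^(k+1) := (pow_succ n k).symm
        _ ≤ v := h1
    have hb2 : v / n < n^(k+1) := by
      rw [Nat.div_lt_iff_lt_mul (by omega)]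
      calc v < n^(k+2) := h2
        _ = n^(k+1) * n := pow_succ n (k+1)
    rw [ih (v / n) hb1 hb2]
    conv_rhs => rw [List.range_succ_eq_map]
    rw [List.map_cons, List.map_map]
    congr 1
    · simp
    · apply List.map_congr_left
      intro i _
      simp only [Function.comp_apply]
      rw [Nat.div_div_eq_div_mul]
      congr 2
      rw [← pow_succ']

theorem pvMsdK_closed (n : Nat) (hn : 2 ≤ n) :
    ∀ (k v : Nat), v < n^(k+1) →
      pvMsdK n k v = ((List.range (k+1)).map (fun i => v / n^i % n)).reverse := by
  intro k
  induction k with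
  | zero =>
    intro v h2
    have h2' : v < n := by simpa using h2
    rw [pvMsdK]
    simp [List.range_one, Nat.mod_eq_of_lt h2']
  | succ k ih =>
    intro v h2
    have hmod : v % n^(k+1) < n^(k+1) :=
      Nat.mod_lt _ (Nat.pos_of_ne_zero (by positivity))
    rw [pvMsdK, ih _ hmod]
    rw [List.range_succ (n := k+1), List.map_append, List.reverse_append]
    simp only [List.map_cons, List.map_nil, List.reverse_cons, List.reverse_nil, List.nil_append,
      List.singleton_append]
    congr 1
    · -- v / n^(k+1) = v / n^(k+1) % n  since v < n^(k+2)
      have : v / n^(k+1) < n := by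
        rw [Nat.div_lt_iff_lt_mul (Nat.pos_of_ne_zero (by positivity))]
        calc v < n^(k+2) := h2
          _ = n * n^(k+1) := (pow_succ' n (k+1))
      exact (Nat.mod_eq_of_lt this).symm
    · congr 1
      apply List.map_congr_left
      intro i hi
      rw [List.mem_range] at hi
      have hsplit : n^(k+1) = n^i * n^(k+1-i) := by
        rw [← pow_add]; congr 1; omega
      rw [hsplit, Nat.mod_mul_right_div_self,
        Nat.mod_mod_of_dvd _ (dvd_pow_self n (by omega))]

theorem pvMsdK_eq_reverse_pvLsd (n : Nat) (hn : 2 ≤ n) (k v : Nat)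
    (h1 : n^k ≤ v) (h2 : v < n^(k+1)) :
    pvMsdK n k v = (pvLsd n v).reverse := by
  rw [pvMsdK_closed n hn k v h2, pvLsd_closed n hn k v h1 h2]

theorem pvLsd_ne_nil (n v : Nat) (hn : 2 ≤ n) (hv : 1 ≤ v) : pvLsd n v ≠ [] := by
  rw [pvLsd, dif_neg (by omega)]
  simp

-- A's loop computes the little-endian digit list, mapped to characters
theorem pvLoopA_eq (l : List Char) (N : Nat) (hn : 2 ≤ N) :
    ∀ (fuel : Nat) (v : Int) (acc : List Char), 0 ≤ v → v.toNat < fuel →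
      pvLoopA l (N : Int) fuel v acc = acc ++ (pvLsd N v.toNat).map (pvG l) := by
  intro fuel
  induction fuel with
  | zero => intro v acc _ h; omega
  | succ fuel ih =>
    intro v acc hv hf
    by_cases h0 : v = 0
    · subst h0
      rw [pvLoopA]
      rw [if_pos rfl, pvLsd, dif_pos (by simp)]
      simp
    · have hV1 : 1 ≤ v.toNat := by omega
      rw [pvLoopA, if_neg h0]
      have hfd : PySem.Int.floordiv v (N : Int) = ((v.toNat / N : Nat) : Int) := by
        conv_lhs => rw [show v = ((v.toNat : Nat) : Int) from (Int.toNat_of_nonneg hv).symm]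
        rw [PySem.Int.floordiv_natCast]
      have hmd : PySem.Int.mod v (N : Int) = ((v.toNat % N : Nat) : Int) := by
        conv_lhs => rw [show v = ((v.toNat : Nat) : Int) from (Int.toNat_of_nonneg hv).symm]
        rw [PySem.Int.mod_natCast]
      rw [hfd, hmd]
      rw [ih _ _ (by positivity) (by
        have := Nat.div_lt_self (by omega : 0 < v.toNat) (by omega : 1 < N)
        simp only [Int.toNat_natCast]
        omega)]
      rw [Int.toNat_natCast]
      rw [show pvLsd N v.toNat = v.toNat % N :: pvLsd N (v.toNat / N) from by
        rw [pvLsd, dif_neg (by omega)]]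
      simp [pvG, List.append_assoc]

-- B's first loop returns the largest power n^k ≤ value
theorem pvFindP_spec (N : Nat) (hn : 2 ≤ N) (v : Int) (hv : 1 ≤ v) :
    ∀ (fuel : Nat) (j : Nat), ((N : Int))^j ≤ v → v < ((N : Int))^j * ((N : Int))^fuel →
      ∃ k : Nat, pvFindP v (N : Int) fuel (((N : Int))^j) = ((N : Int))^k ∧
        ((N : Int))^k ≤ v ∧ v < ((N : Int))^(k+1) := by
  intro fuel
  induction fuel with
  | zero =>
    intro j h1 h2
    simp only [pow_zero, mul_one] at h2
    omega
  | succ fuel ih =>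
    intro j h1 h2
    rw [pvFindP]
    by_cases hc : ((N : Int))^j * (N : Int) ≤ v
    · rw [if_pos hc]
      have : ((N : Int))^j * (N : Int) = ((N : Int))^(j+1) := (pow_succ _ _).symm
      rw [this]
      apply ih (j+1) (by omega)
      calc v < ((N : Int))^j * ((N : Int))^(fuel+1) := h2
        _ = ((N : Int))^(j+1) * ((N : Int))^fuel := by ring
    · rw [if_neg hc]
      exact ⟨j, rfl, h1, by rw [pow_succ]; omega⟩

-- B's second loop, started at p = n^k with enough fuel, computes pvMsdK mapped to chars
theorem pvMsdLoop_eq (l : List Char) (N : Nat) (hn : 2 ≤ N) :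
    ∀ (k fuel : Nat) (v : Int), 0 ≤ v → N^k ≤ fuel →
      pvMsdLoop l (N : Int) fuel (((N : Int))^k) v = (pvMsdK N k v.toNat).map (pvG l) := by
  intro k
  induction k with
  | zero =>
    intro fuel v hv hf
    simp only [pow_zero] at hf ⊢
    obtain ⟨g, rfl⟩ : ∃ g, fuel = g + 1 := ⟨fuel - 1, by omega⟩
    rw [pvMsdLoop, if_neg (by omega)]
    have hV : v = ((v.toNat : Nat) : Int) := (Int.toNat_of_nonneg hv).symm
    have h1 : PySem.Int.floordiv v 1 = v := by
      rw [hV]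
      rw [show (1 : Int) = ((1 : Nat) : Int) from rfl, PySem.Int.floordiv_natCast]
      simp
    have h2 : PySem.Int.floordiv 1 (N : Int) = 0 := by
      rw [show (1 : Int) = ((1 : Nat) : Int) from rfl, PySem.Int.floordiv_natCast]
      rw [Nat.div_eq_of_lt (by omega)]
      simp
    have h3 : PySem.Int.mod v 1 = 0 := by
      rw [hV, show (1 : Int) = ((1 : Nat) : Int) from rfl, PySem.Int.mod_natCast]
      simp
    rw [h1, h2, h3]
    have : pvMsdLoop l (N : Int) g 0 0 = [] := by
      cases g with
      | zero => rw [pvMsdLoop]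
      | succ g => rw [pvMsdLoop, if_pos rfl]
    rw [this]
    simp only [pvMsdK, List.map_cons, List.map_nil, pvG, Int.toNat_of_nonneg hv]
  | succ k ih =>
    intro fuel v hv hf
    have hpow1 : 1 ≤ N^k := Nat.one_le_pow _ _ (by omega)
    have hpow : N^(k+1) = N^k * N := pow_succ N k
    have hpk1 : 1 ≤ N^(k+1) := Nat.one_le_pow _ _ (by omega)
    obtain ⟨g, rfl⟩ : ∃ g, fuel = g + 1 := ⟨fuel - 1, by omega⟩
    rw [pvMsdLoop, if_neg (by positivity)]
    have hcast : (((N : Int)))^(k+1) = ((N^(k+1) : Nat) : Int) := by push_cast; ring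
    have hdiv : PySem.Int.floordiv (((N : Int))^(k+1)) (N : Int) = ((N : Int))^k := by
      rw [hcast, PySem.Int.floordiv_natCast, hpow, Nat.mul_div_left (N^k) (by omega)]
      push_cast; ring
    have hmod : PySem.Int.mod v (((N : Int))^(k+1)) = ((v.toNat % N^(k+1) : Nat) : Int) := by
      conv_lhs => rw [show v = ((v.toNat : Nat) : Int) from (Int.toNat_of_nonneg hv).symm, hcast]
      rw [PySem.Int.mod_natCast]
    have hidx : PySem.Int.floordiv v (((N : Int))^(k+1)) = ((v.toNat / N^(k+1) : Nat) : Int) := by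
      conv_lhs => rw [show v = ((v.toNat : Nat) : Int) from (Int.toNat_of_nonneg hv).symm, hcast]
      rw [PySem.Int.floordiv_natCast]
    rw [hdiv, hmod, hidx]
    rw [ih g _ (by positivity) (by nlinarith [hpow1, hf, hpow, hn])]
    rw [Int.toNat_natCast]
    rw [pvMsdK]
    simp [pvG]

-- main equality on the underlying character lists
theorem pvMainEq (l : List Char) (value : Int) (hn : 2 ≤ l.length) (hv : 1 ≤ value) :
    (pvLoopA l (l.length : Int) (value.toNat + 1) value []).reverse =
      pvMsdLoop l (l.length : Int)
        ((pvFindP value (l.length : Int) (value.toNat + 1) 1).toNat + 1)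
        (pvFindP value (l.length : Int) (value.toNat + 1) 1) value := by
  have hv0 : 0 ≤ value := by omega
  rw [pvLoopA_eq l l.length hn (value.toNat + 1) value [] hv0 (by omega)]
  rw [List.nil_append]
  obtain ⟨k, hp, hk1, hk2⟩ := pvFindP_spec l.length hn value hv (value.toNat + 1) 0
    (by simpa using hv)
    (by
      simp only [pow_zero, one_mul]
      have h1 : value.toNat < 2^(value.toNat) := Nat.lt_two_pow_self
      have h2 : (2:Nat)^(value.toNat) ≤ l.length^(value.toNat) := Nat.pow_le_pow_left hn _
      have h3 : l.length^(value.toNat) ≤ l.length^(value.toNat + 1) :=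
        Nat.pow_le_pow_right (by omega) (by omega)
      have h4 : value.toNat < l.length^(value.toNat + 1) := by omega
      calc value = ((value.toNat : Nat) : Int) := (Int.toNat_of_nonneg hv0).symm
        _ < ((l.length^(value.toNat + 1) : Nat) : Int) := by exact_mod_cast h4
        _ = ((l.length : Int))^(value.toNat + 1) := by push_cast; ring)
  have hp1 : pvFindP value (l.length : Int) (value.toNat + 1) 1 = ((l.length : Int))^k := by
    simpa using hp
  rw [hp1]
  have hptoNat : (((l.length : Int))^k).toNat = l.length^k := by
    rw [show ((l.length : Int))^k = ((l.length^k : Nat) : Int) by push_cast; ring]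
    exact Int.toNat_natCast _
  rw [pvMsdLoop_eq l l.length hn k ((((l.length : Int))^k).toNat + 1) value hv0 (by omega)]
  have hb1 : l.length^k ≤ value.toNat := by
    have : ((l.length^k : Nat) : Int) ≤ value := by push_cast; exact_mod_cast hk1
    omega
  have hb2 : value.toNat < l.length^(k+1) := by
    have : value < ((l.length^(k+1) : Nat) : Int) := by push_cast; exact_mod_cast hk2
    omega
  rw [pvMsdK_eq_reverse_pvLsd l.length hn k value.toNat hb1 hb2]
  rw [List.map_reverse]

theorem pvMainNe (l : List Char) (value : Int) (hn : 2 ≤ l.length) (hv : 1 ≤ value) :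
    (pvLoopA l (l.length : Int) (value.toNat + 1) value []).reverse ≠ [] := by
  rw [pvLoopA_eq l l.length hn (value.toNat + 1) value [] (by omega) (by omega)]
  simp only [List.nil_append, ne_eq, List.reverse_eq_nil_iff, List.map_eq_nil_iff]
  exact pvLsd_ne_nil l.length value.toNat hn (by omega)

-- ===== VERDICT (by name: the statement is the Claim_ definition above) =====
theorem hy36_encode_pure_py_spec : Claim_equal_hy36_encode_pure_py := by
  intro digits value _ hpre
  obtain ⟨hv, hlen, hcase⟩ := hpre
  unfold Spec_hy36_encode_pure_py hy36_encode_pure_py hy36_encode_pure_py_alt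
  by_cases h0 : value = 0
  · simp [h0, pvLoopA]
  · have hn : 2 ≤ digits.toList.length := by
      rcases hcase with h | h
      · exact absurd h h0
      · omega
    have hv1 : 1 ≤ value := by omega
    simp only [if_neg h0]
    rw [if_pos (pvMainNe digits.toList value hn hv1)]
    rw [pvMainEq digits.toList value hn hv1]
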